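-- pv_equiv track=rewrite | github.com/Strzelacz48/Semestr4Uwr | AI/L1/1_5_nonogram.py | opt_init
-- ===== SOURCE A (Python) =====
-- def opt_dist(arr, dl):
--     pref = 0
--     suf = 0
--     inn = 0
--     for i in range(dl):
--         if arr[i] == 0:
--             inn += 1
--     for i in range(dl, len(arr)):
--         if arr[i] == 1:
--             suf += 1
--     x = pref + inn + suf
--     a = 1
--     b = dl
--     while b < len(arr):
--         if arr[a-1] == 1:
--             pref += 1
--         else: # arr[a-1] == 0
--             inn -= 1
--         if arr[b] == 1:
--             suf -= 1
--         else: # arr[b] == 0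
--             inn += 1
--         x = min(x, pref + suf + inn)
--         a += 1
--         b += 1
--     return x
--
-- def opt_init(x, y, tab, dls):
--     opt_lines = []
--     opt_columns = []
--     for i in range(y):
--         opt_lines.append(opt_dist(tab[i], dls[0][i]))
--     for j in range(x):
--         arr = []
--         for i in range(y):
--             arr.append(tab[i][j])
--         opt_columns.append(opt_dist(arr, dls[1][j]))
--     return [opt_lines, opt_columns]
-- ===== SOURCE B (Python) =====
-- def opt_dist(arr, dl):
--     return min(arr[k:k + dl].count(0) + arr[:k].count(1) + arr[k + dl:].count(1)
--                for k in range(len(arr) - dl + 1))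
--
-- def opt_init(x, y, tab, dls):
--     rows = [opt_dist(tab[i], dls[0][i]) for i in range(y)]
--     cols = [opt_dist([tab[i][j] for i in range(y)], dls[1][j]) for j in range(x)]
--     return [rows, cols]
-- ===== Notes on version B (the rewrite author's own statement) =====
-- stated objective: simpler
-- what changed: opt_dist's incremental pref/suf/inn counter machinery with a running min is replaced by the heuristic's direct definition: a one-line min over all window positions k, recomputing each position's cost from scratch with slice counts; opt_init becomes two comprehensions.
-- outside the precondition, e.g. on opt_init(2, 1, [[0, 2]], [[1], [1, 1]]): A returns [[1], [1, 0]], B returns [[0], [1, 0]]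
import Mathlib
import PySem

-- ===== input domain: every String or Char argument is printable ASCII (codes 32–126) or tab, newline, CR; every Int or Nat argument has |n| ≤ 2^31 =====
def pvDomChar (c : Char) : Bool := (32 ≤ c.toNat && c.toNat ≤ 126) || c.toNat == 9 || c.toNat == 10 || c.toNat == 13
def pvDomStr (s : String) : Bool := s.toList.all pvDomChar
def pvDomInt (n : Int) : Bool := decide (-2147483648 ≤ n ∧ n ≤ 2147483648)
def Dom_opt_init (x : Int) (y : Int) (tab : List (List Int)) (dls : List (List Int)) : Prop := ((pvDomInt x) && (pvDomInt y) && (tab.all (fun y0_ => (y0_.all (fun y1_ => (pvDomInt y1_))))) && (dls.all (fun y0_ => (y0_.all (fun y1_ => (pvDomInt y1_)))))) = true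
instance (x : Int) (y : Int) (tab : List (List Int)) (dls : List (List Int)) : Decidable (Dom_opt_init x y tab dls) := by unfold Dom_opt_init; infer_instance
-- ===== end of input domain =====

-- B replaces opt_dist's incremental pref/suf/inn counters and running min by the heuristic's direct
-- definition: a min over all window positions k of the cost recomputed from scratch via slice counts.


-- ===== PORT A =====
-- body of A's while loop; b is the loop counter (Python keeps a second counter a with a - 1 = b - dl)
def optDistStepA (arr : List Int) (dl : Int) (st : Int × Int × Int × Int) (b : Int) : Int × Int × Int × Int :=
  let (pref, suf, inn, x) := st
  let (pref, inn) := if PySem.List.pyGetD arr (b - dl) 0 = 1 then (pref + 1, inn) else (pref, inn - 1)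
  let (suf, inn) := if PySem.List.pyGetD arr b 0 = 1 then (suf - 1, inn) else (suf, inn + 1)
  (pref, suf, inn, min x (pref + suf + inn))

-- opt_dist of A: two counting loops, then the while loop over b = dl, dl+1, …, len(arr)-1
-- (indexing is via pyGetD; Pre_ keeps every index A uses in range, where pyGetD equals Python's arr[i])
def optDistA (arr : List Int) (dl : Int) : Int :=
  let inn := (PySem.List.pyRange 0 dl 1).foldl (fun inn i => if PySem.List.pyGetD arr i 0 = 0 then inn + 1 else inn) 0
  let suf := (PySem.List.pyRange dl arr.length 1).foldl (fun suf i => if PySem.List.pyGetD arr i 0 = 1 then suf + 1 else suf) 0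
  let st := (PySem.List.pyRange dl arr.length 1).foldl (optDistStepA arr dl) (0, suf, inn, 0 + inn + suf)
  st.2.2.2

def opt_init (x : Int) (y : Int) (tab : List (List Int)) (dls : List (List Int)) : List (List Int) :=
  let opt_lines := (PySem.List.pyRange 0 y 1).foldl (fun acc i =>
    acc ++ [optDistA (PySem.List.pyGetD tab i []) (PySem.List.pyGetD (PySem.List.pyGetD dls 0 []) i 0)]) []
  let opt_columns := (PySem.List.pyRange 0 x 1).foldl (fun acc j =>
    let arr := (PySem.List.pyRange 0 y 1).foldl (fun a i => a ++ [PySem.List.pyGetD (PySem.List.pyGetD tab i []) j 0]) []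
    acc ++ [optDistA arr (PySem.List.pyGetD (PySem.List.pyGetD dls 1 []) j 0)]) []
  [opt_lines, opt_columns]

-- ===== PORT B =====
-- cost of placing the window at position k: zeros inside arr[k:k+dl] plus ones outside
def optDistCostB (arr : List Int) (dl : Int) (k : Int) : Int :=
  ((PySem.List.slice arr (some k) (some (k + dl))).count 0 : Int)
  + ((PySem.List.slice arr none (some k)).count 1 : Int)
  + ((PySem.List.slice arr (some (k + dl)) none).count 1 : Int)

-- B's opt_dist: Python's min(...) over the k-range; under Pre_ (dl ≤ len(arr)) the range is
-- nonempty, so Python's min never raises and the .getD 0 default is unreachable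
def optDistB (arr : List Int) (dl : Int) : Int :=
  (PySem.List.min? ((PySem.List.pyRange 0 ((arr.length : Int) - dl + 1) 1).map (optDistCostB arr dl))
    (fun v => v)).getD 0

def opt_init_alt (x : Int) (y : Int) (tab : List (List Int)) (dls : List (List Int)) : List (List Int) :=
  [(PySem.List.pyRange 0 y 1).map (fun i =>
      optDistB (PySem.List.pyGetD tab i []) (PySem.List.pyGetD (PySem.List.pyGetD dls 0 []) i 0)),
   (PySem.List.pyRange 0 x 1).map (fun j =>
      optDistB ((PySem.List.pyRange 0 y 1).map (fun i => PySem.List.pyGetD (PySem.List.pyGetD tab i []) j 0))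
               (PySem.List.pyGetD (PySem.List.pyGetD dls 1 []) j 0))]

-- ===== PRECONDITION & SPEC =====
-- Pre_ is the natural nonogram domain: grid cells are 0/1 and the shape/block-length bounds are exactly
-- those under which A raises no IndexError.  The only inputs excluded on which A still RETURNS are grids
-- with a cell outside {0,1}, where A's loops classify the cell inconsistently (the first tests ==0, the
-- others ==1) and the returned value is an accident of the implementation (see claim cites).
def Pre_opt_init (x : Int) (y : Int) (tab : List (List Int)) (dls : List (List Int)) : Prop :=
  (0 < y → y ≤ (tab.length : Int) ∧ 1 ≤ dls.length ∧ y ≤ ((dls.getD 0 []).length : Int) ∧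
    ∀ i < y.toNat, (∀ v ∈ tab.getD i [], v = 0 ∨ v = 1) ∧
      0 ≤ (dls.getD 0 []).getD i 0 ∧ (dls.getD 0 []).getD i 0 ≤ ((tab.getD i []).length : Int)) ∧
  (0 < x → 2 ≤ dls.length ∧ x ≤ ((dls.getD 1 []).length : Int) ∧
    (∀ i < y.toNat, x ≤ ((tab.getD i []).length : Int)) ∧
    ∀ j < x.toNat, 0 ≤ (dls.getD 1 []).getD j 0 ∧ (dls.getD 1 []).getD j 0 ≤ (y.toNat : Int))
instance (x : Int) (y : Int) (tab : List (List Int)) (dls : List (List Int)) : Decidable (Pre_opt_init x y tab dls) := by unfold Pre_opt_init; infer_instance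

def pvWitness_opt_init : Int × Int × List (List Int) × List (List Int) := (1, 1, [[1]], [[1], [1]])

def Spec_opt_init (x : Int) (y : Int) (tab : List (List Int)) (dls : List (List Int)) (out : List (List Int)) : Prop := out = opt_init_alt x y tab dls
instance (x : Int) (y : Int) (tab : List (List Int)) (dls : List (List Int)) (out : List (List Int)) : Decidable (Spec_opt_init x y tab dls out) := by unfold Spec_opt_init; infer_instance

-- ===== CLAIM (what is proved, stated in full; the proofs are below) =====
def Claim_equal_opt_init : Prop := ∀ (x : Int) (y : Int) (tab : List (List Int)) (dls : List (List Int)), Dom_opt_init x y tab dls → Pre_opt_init x y tab dls → Spec_opt_init x y tab dls (opt_init x y tab dls)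

-- ===== LEMMAS AND PROOFS =====

-- ones among the first m cells; pvCost is the common closed form both programs are reduced to
def pvOnes (arr : List Int) (m : Nat) : Int := ((arr.take m).count 1 : Int)
def pvCost (arr : List Int) (d k : Nat) : Int :=
  2 * pvOnes arr k + (d : Int) + ((arr.count 1 : Int)) - 2 * pvOnes arr (k + d)

lemma pvOnes_zero (arr : List Int) : pvOnes arr 0 = 0 := by simp [pvOnes]

lemma pvOnes_succ (arr : List Int) (k : Nat) (h : k < arr.length) :
    pvOnes arr (k + 1) = pvOnes arr k + (if arr[k] = 1 then 1 else 0) := by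
  unfold pvOnes
  rw [List.take_add_one, List.count_append]
  have : arr[k]? = some arr[k] := List.getElem?_eq_getElem h
  rw [this]
  by_cases h1 : arr[k] = 1 <;> simp [h1]

lemma dropOnes (arr : List Int) (m : Nat) :
    ((arr.drop m).count 1 : Int) = (arr.count 1 : Int) - pvOnes arr m := by
  have hs : arr.count 1 = (arr.take m).count 1 + (arr.drop m).count 1 := by
    conv_lhs => rw [← List.take_append_drop m arr]
    rw [List.count_append]
  unfold pvOnes
  omega

lemma binary_count (l : List Int) (h : ∀ v ∈ l, v = 0 ∨ v = 1) :
    l.count 0 + l.count 1 = l.length := by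
  induction l with
  | nil => simp
  | cons v t ih =>
    have hv := h v (by simp)
    have ht := ih (fun u hu => h u (by simp [hu]))
    rcases hv with hv | hv <;> subst hv <;> simp <;> omega

-- zeros of the length-d window at k, through prefix ones (needs 0/1 cells and the window in range)
lemma windowZeros (arr : List Int) (hbin : ∀ v ∈ arr, v = 0 ∨ v = 1) (d k : Nat)
    (h : k + d ≤ arr.length) :
    (((arr.drop k).take d).count 0 : Int) = (d : Int) - pvOnes arr (k + d) + pvOnes arr k := by
  have htadd : arr.take (k + d) = arr.take k ++ (arr.drop k).take d := List.take_add ..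
  have hcnt : pvOnes arr (k + d) = pvOnes arr k + (((arr.drop k).take d).count 1 : Int) := by
    unfold pvOnes; rw [htadd, List.count_append]; push_cast; ring
  have hb : ((arr.drop k).take d).count 0 + ((arr.drop k).take d).count 1
      = ((arr.drop k).take d).length :=
    binary_count _ (fun v hv => hbin v (List.mem_of_mem_drop (List.mem_of_mem_take hv)))
  have hl : ((arr.drop k).take d).length = d := by
    simp [List.length_take, List.length_drop]; omega
  omega

-- a counting loop over range(a, a+n) counting pyGetD hits is a List.count on the corresponding segment
lemma countP_pyRange_getD (arr : List Int) (c : Int) :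
    ∀ (n : Nat) (a : Int), 0 ≤ a → a + n ≤ (arr.length : Int) →
    ((PySem.List.pyRange a (a + n) 1).countP (fun i => decide (PySem.List.pyGetD arr i 0 = c)) : Int)
      = (((arr.drop a.toNat).take n).count c : Int) := by
  intro n
  induction n with
  | zero => intro a h0 hb; simp
  | succ n ih =>
    intro a h0 hb
    rw [PySem.List.pyRange_one_cons (by omega : a < a + ((n+1 : Nat) : Int))]
    have hlt : a.toNat < arr.length := by omega
    have hdrop : arr.drop a.toNat = arr[a.toNat] :: arr.drop (a.toNat + 1) :=
      List.drop_eq_getElem_cons hlt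
    have hget : PySem.List.pyGetD arr a 0 = arr[a.toNat] :=
      PySem.List.pyGetD_eq_getElem arr 0 h0 (by omega)
    have harg : a + ((n+1 : Nat) : Int) = (a + 1) + (n : Int) := by push_cast; ring
    rw [harg, List.countP_cons]
    push_cast
    rw [ih (a+1) (by omega) (by omega)]
    have hn : (a+1).toNat = a.toNat + 1 := by omega
    rw [hn, hdrop, List.take_succ_cons, List.count_cons]
    push_cast
    simp only [hget]
    by_cases h : arr[a.toNat] = c <;> simp [h]

-- A's while loop, characterised: from the invariant state at position k it computes the
-- left-to-right running min of the window costs at positions k+1, …, k+t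
lemma optDistA_loop (arr : List Int) (hbin : ∀ v ∈ arr, v = 0 ∨ v = 1) (d : Nat) :
    ∀ (t k : Nat) (p s i x : Int), k + d + t = arr.length →
    p = pvOnes arr k → s = (arr.count 1 : Int) - pvOnes arr (k + d) →
    i = (d : Int) - pvOnes arr (k + d) + pvOnes arr k →
    ((PySem.List.pyRange ((k : Int) + (d : Int)) (arr.length : Int) 1).foldl
        (optDistStepA arr (d : Int)) (p, s, i, x)).2.2.2
      = ((List.range t).map (fun j => pvCost arr d (k + 1 + j))).foldl min x := by
  intro t
  induction t with
  | zero =>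
    intro k p s i x hkt hp hs hi
    rw [PySem.List.pyRange_one_eq_nil (by omega)]
    simp
  | succ t ih =>
    intro k p s i x hkt hp hs hi
    subst hp; subst hs; subst hi
    rw [PySem.List.pyRange_one_cons (by omega)]
    rw [List.foldl_cons]
    have hk : k < arr.length := by omega
    have hkd : k + d < arr.length := by omega
    have hg1 : PySem.List.pyGetD arr ((k : Int) + (d : Int) - (d : Int)) 0 = arr[k] := by
      have he : (k : Int) + (d : Int) - (d : Int) = (k : Int) := by ring
      rw [he, PySem.List.pyGetD_eq_getElem arr 0 (by omega) (by omega)]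
      simp
    have hg2 : PySem.List.pyGetD arr ((k : Int) + (d : Int)) 0 = arr[k + d] := by
      rw [PySem.List.pyGetD_eq_getElem arr 0 (by omega) (by omega)]
      congr 1
    have hO1 := pvOnes_succ arr k hk
    have hO2 := pvOnes_succ arr (k + d) hkd
    have hstep : optDistStepA arr (d : Int)
        (pvOnes arr k, (arr.count 1 : Int) - pvOnes arr (k + d),
         (d : Int) - pvOnes arr (k + d) + pvOnes arr k, x) ((k : Int) + (d : Int))
      = (pvOnes arr (k + 1), (arr.count 1 : Int) - pvOnes arr (k + 1 + d),
         (d : Int) - pvOnes arr (k + 1 + d) + pvOnes arr (k + 1),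
         min x (pvCost arr d (k + 1))) := by
      have hEq : pvOnes arr (k + 1 + d) = pvOnes arr (k + d + 1) := by
        congr 1; omega
      rcases hbin arr[k] (List.getElem_mem hk) with ha | ha <;>
        rcases hbin arr[k + d] (List.getElem_mem hkd) with hb | hb <;>
        · rw [ha] at hO1; rw [hb] at hO2; norm_num at hO1 hO2
          simp only [optDistStepA, hg1, hg2, ha, hb]
          norm_num [Prod.ext_iff, pvCost]
          omega
    rw [hstep]
    have harg : (k : Int) + (d : Int) + 1 = ((k + 1 : Nat) : Int) + (d : Int) := by push_cast; ring
    rw [harg]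
    rw [ih (k + 1) (pvOnes arr (k + 1)) ((arr.count 1 : Int) - pvOnes arr (k + 1 + d))
      ((d : Int) - pvOnes arr (k + 1 + d) + pvOnes arr (k + 1))
      (min x (pvCost arr d (k + 1))) (by omega) rfl rfl rfl]
    rw [List.range_succ_eq_map, List.map_cons, List.foldl_cons, List.map_map]
    refine congrArg₂ (fun a l => List.foldl min a l) ?_ ?_
    · norm_num
    · refine List.map_congr_left (fun j hj => ?_)
      simp only [Function.comp]
      congr 1
      omega

-- B's per-position cost equals pvCost (slice bookkeeping plus the window-zeros identity)
lemma costB_eq (arr : List Int) (hbin : ∀ v ∈ arr, v = 0 ∨ v = 1) (d k : Nat)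
    (h : k + d ≤ arr.length) :
    optDistCostB arr (d : Int) (k : Int) = pvCost arr d k := by
  unfold optDistCostB
  have hkd : (k : Int) + (d : Int) = ((k + d : Nat) : Int) := by push_cast; ring
  rw [hkd]
  rw [PySem.List.slice_natCast, PySem.List.slice_to_natCast, PySem.List.slice_from_natCast]
  have hsub : k + d - k = d := by omega
  rw [hsub, windowZeros arr hbin d k h, dropOnes]
  unfold pvCost pvOnes
  ring

-- the heart of the file: on a 0/1 line with 0 ≤ dl ≤ len, A's opt_dist equals B's min over positions
lemma optDist_eq (arr : List Int) (dl : Int) (h0 : 0 ≤ dl) (hlen : dl ≤ (arr.length : Int))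
    (hbin : ∀ v ∈ arr, v = 0 ∨ v = 1) : optDistA arr dl = optDistB arr dl := by
  have hdl : dl = ((dl.toNat : Nat) : Int) := by omega
  set d : Nat := dl.toNat with hd
  have hdn : d ≤ arr.length := by omega
  -- A's two initial counting loops
  have hinn : ((PySem.List.pyRange 0 dl 1).foldl (fun inn i => if PySem.List.pyGetD arr i 0 = 0 then inn + 1 else inn) (0:Int))
      = ((arr.take d).count 0 : Int) := by
    rw [PySem.List.foldl_ite_add_one]
    have := countP_pyRange_getD arr 0 d 0 le_rfl (by omega)
    simp only [zero_add, Int.toNat_zero, List.drop_zero] at this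
    rw [← hdl] at this
    omega
  have hsuf : ((PySem.List.pyRange dl arr.length 1).foldl (fun suf i => if PySem.List.pyGetD arr i 0 = 1 then suf + 1 else suf) (0:Int))
      = ((arr.drop d).count 1 : Int) := by
    rw [PySem.List.foldl_ite_add_one]
    have := countP_pyRange_getD arr 1 (arr.length - d) dl h0 (by omega)
    have harg : dl + ((arr.length - d : Nat) : Int) = (arr.length : Int) := by omega
    rw [harg] at this
    have htn : dl.toNat = d := rfl
    rw [htn] at this
    rw [List.take_of_length_le (by simp)] at this
    omega
  have hIz : ((arr.take d).count 0 : Int) = (d : Int) - pvOnes arr (0 + d) + pvOnes arr 0 := by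
    have := windowZeros arr hbin d 0 (by omega)
    simpa using this
  have hSz : ((arr.drop d).count 1 : Int) = (arr.count 1 : Int) - pvOnes arr (0 + d) := by
    have := dropOnes arr d
    simpa using this
  have hx0 : (0 : Int) + ((arr.take d).count 0 : Int) + ((arr.drop d).count 1 : Int)
      = pvCost arr d 0 := by
    rw [hIz, hSz]; unfold pvCost; rw [pvOnes_zero]; ring
  -- A reduced to the running min of pvCost
  have hloop := optDistA_loop arr hbin d (arr.length - d) 0 0
    ((arr.count 1 : Int) - pvOnes arr (0 + d)) ((d : Int) - pvOnes arr (0 + d) + pvOnes arr 0)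
    ((0 : Int) + ((arr.take d).count 0 : Int) + ((arr.drop d).count 1 : Int))
    (by omega) (pvOnes_zero arr).symm rfl rfl
  rw [show ((0 : Nat) : Int) + (d : Int) = (d : Int) by norm_num] at hloop
  rw [← hIz, ← hSz] at hloop
  have hA : optDistA arr dl
      = ((List.range (arr.length - d)).map (fun j => pvCost arr d (0 + 1 + j))).foldl min
          ((0 : Int) + ((arr.take d).count 0 : Int) + ((arr.drop d).count 1 : Int)) := by
    simp only [optDistA]
    rw [hinn, hsuf, hdl]
    exact hloop
  -- B reduced to the same running min
  have hB : optDistB arr dl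
      = ((List.range (arr.length - d)).map (fun j => pvCost arr d (j + 1))).foldl min
          (pvCost arr d 0) := by
    unfold optDistB
    have hm : (arr.length : Int) - dl + 1 = ((arr.length - d + 1 : Nat) : Int) := by omega
    rw [hm, PySem.List.pyRange_one]
    have ht : (((arr.length - d + 1 : Nat) : Int) - 0).toNat = arr.length - d + 1 := by omega
    rw [ht, List.map_map]
    have hlist : (List.range (arr.length - d + 1)).map ((optDistCostB arr dl) ∘ fun k : Nat => (0 : Int) + (k : Int))
        = (List.range (arr.length - d + 1)).map (fun k : Nat => pvCost arr d k) := by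
      refine List.map_congr_left (fun k hk => ?_)
      rw [List.mem_range] at hk
      simp only [Function.comp]
      rw [hdl]
      rw [show (0 : Int) + ((k : Nat) : Int) = ((k : Nat) : Int) by ring]
      exact costB_eq arr hbin d k (by omega)
    rw [hlist, List.range_succ_eq_map, List.map_cons, List.map_map, PySem.List.min?_id_cons]
    rfl
  rw [hA, hB, hx0]
  refine congrArg₂ (fun a l => List.foldl min a l) rfl ?_
  refine List.map_congr_left (fun j hj => ?_)
  congr 1
  omega

-- pyGetD yields the default or a member of the list
lemma pyGetD_default_or_mem {α : Type} (xs : List α) (i : Int) (d : α) :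
    PySem.List.pyGetD xs i d = d ∨ PySem.List.pyGetD xs i d ∈ xs := by
  by_cases h : PySem.Raise.InRange xs.length i
  · exact Or.inr (PySem.List.pyGetD_mem xs d h)
  · left
    have hn : PySem.List.pyGet? xs i = none := by
      unfold PySem.Raise.InRange at h
      unfold PySem.List.pyGet? PySem.List.pyIdx?
      split_ifs with h1 h2 <;> simp_all <;> omega
    exact PySem.List.pyGetD_of_none xs i d hn

-- ===== VERDICT (by name: the statement is the Claim_ definition above) =====
theorem opt_init_spec : Claim_equal_opt_init := by
  intro x y tab dls _ hpre
  obtain ⟨hrow, hcol⟩ := hpre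
  unfold Spec_opt_init opt_init opt_init_alt
  simp only [PySem.List.foldl_append_singleton_eq_map, List.nil_append]
  refine congrArg₂ (fun a b => [a, b]) ?_ ?_
  · refine List.map_congr_left (fun i hi => ?_)
    rw [PySem.List.mem_pyRange_one] at hi
    obtain ⟨hyt, hd1, hd2, hd3⟩ := hrow (by omega)
    have hiy : i.toNat < y.toNat := by omega
    have hrowget : PySem.List.pyGetD tab i [] = tab.getD i.toNat [] :=
      PySem.List.pyGetD_of_nonneg _ _ hi.1
    have hdlget : PySem.List.pyGetD (PySem.List.pyGetD dls 0 []) i 0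
        = (dls.getD 0 []).getD i.toNat 0 := by
      rw [PySem.List.pyGetD_zero, PySem.List.pyGetD_of_nonneg _ _ hi.1]
    obtain ⟨hbini, hdl0, hdl1⟩ := hd3 i.toNat hiy
    apply optDist_eq
    · rw [hdlget]; exact hdl0
    · rw [hdlget, hrowget]; exact hdl1
    · rw [hrowget]; exact hbini
  · refine List.map_congr_left (fun j hj => ?_)
    rw [PySem.List.mem_pyRange_one] at hj
    obtain ⟨hd1, hd2, hd3, hd4⟩ := hcol (by omega)
    have hdlget : PySem.List.pyGetD (PySem.List.pyGetD dls 1 []) j 0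
        = (dls.getD 1 []).getD j.toNat 0 := by
      rw [show (1 : Int) = ((1 : Nat) : Int) from rfl, PySem.List.pyGetD_natCast,
        PySem.List.pyGetD_of_nonneg _ _ hj.1]
    obtain ⟨hdl0, hdl1⟩ := hd4 j.toNat (by omega)
    have hlenarr : (((PySem.List.pyRange 0 y 1).map
        (fun i => PySem.List.pyGetD (PySem.List.pyGetD tab i []) j 0)).length : Int) = (y.toNat : Int) := by
      simp [PySem.List.length_pyRange_one]
    apply optDist_eq
    · rw [hdlget]; exact hdl0
    · rw [hdlget, hlenarr]; exact hdl1
    · intro v hv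
      simp only [List.mem_map] at hv
      obtain ⟨i, hi, rfl⟩ := hv
      rw [PySem.List.mem_pyRange_one] at hi
      obtain ⟨hyt, he1, he2, he3⟩ := hrow (by omega)
      have hrowget : PySem.List.pyGetD tab i [] = tab.getD i.toNat [] :=
        PySem.List.pyGetD_of_nonneg _ _ hi.1
      obtain ⟨hbini, -, -⟩ := he3 i.toNat (by omega)
      rw [hrowget]
      rcases pyGetD_default_or_mem (tab.getD i.toNat []) j 0 with h2 | h2
      · exact Or.inl h2
      · exact hbini _ h2
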